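-- pv_equiv track=rewrite | github.com/boisei0/PyBitmessage | src/addresses.py | decode_base58
-- ===== SOURCE A (Python) =====
-- ALPHABET = "123456789ABCDEFGHJKLMNPQRSTUVWXYZabcdefghijkmnopqrstuvwxyz"
--
-- def decode_base58(string, alphabet=ALPHABET):
--     """Decode a Base X encoded string into the number
--
--     Arguments:
--     - `string`: The encoded string
--     - `alphabet`: The alphabet to use for encoding
--     """
--     base = len(alphabet)
--     str_len = len(string)
--     num = 0
--
--     try:
--         power = str_len - 1
--         for char in string:
--             num += alphabet.index(char) * (base ** power)
--             power -= 1
--     except: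
--         # character not found (like a space character or a 0)
--         return 0
--     return num
-- ===== SOURCE B (Python) =====
-- ALPHABET = "123456789ABCDEFGHJKLMNPQRSTUVWXYZabcdefghijkmnopqrstuvwxyz"
--
-- def decode_base58(string, alphabet=ALPHABET):
--     """Decode a Base X encoded string into the number (Horner's method,
--     single pass, with a precomputed char->index table)."""
--     base = len(alphabet)
--     index = {}
--     for i, c in enumerate(alphabet):
--         if c not in index:
--             index[c] = i
--     num = 0
--     for c in string:
--         d = index.get(c)
--         if d is None:
--             # character not in the alphabet
--             return 0
--         num = num * base + d
--     return num
-- ===== Notes on version B (the rewrite author's own statement) =====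
-- stated objective: faster
-- what changed: Replaces the positional sum with base**power and a repeated alphabet.index scan by Horner's method in a single pass over the string, using a char-to-index dict precomputed once from the alphabet.
import Mathlib
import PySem

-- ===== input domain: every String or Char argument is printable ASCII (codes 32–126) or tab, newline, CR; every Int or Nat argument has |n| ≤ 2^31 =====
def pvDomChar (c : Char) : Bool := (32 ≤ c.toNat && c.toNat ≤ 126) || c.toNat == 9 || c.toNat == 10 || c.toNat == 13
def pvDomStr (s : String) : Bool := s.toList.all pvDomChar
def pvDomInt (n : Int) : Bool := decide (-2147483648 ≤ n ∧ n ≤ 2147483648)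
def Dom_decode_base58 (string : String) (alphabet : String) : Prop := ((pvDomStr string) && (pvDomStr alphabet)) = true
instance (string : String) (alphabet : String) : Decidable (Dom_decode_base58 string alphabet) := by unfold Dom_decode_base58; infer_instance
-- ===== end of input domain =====

-- B replaces A's per-character alphabet.index scan and base**power with a dict built once and a
-- single Horner pass; equal return value on all inputs (A is total: it returns 0 on a bad char).

-- ===== PORT A =====
-- the loop: num += alphabet.index(char) * base ** power; power -= 1; a failed index → none (the except branch).
-- power is an Int that is ≥ 0 whenever the exponent is used, so `base ^ power.toNat` is Python's `base ** power` here.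
def pvALoop (chars : List Char) (alpha : List Char) (base : Int) (num : Int) (power : Int) : Option Int :=
  match chars with
  | [] => some num
  | c :: rest =>
    match PySem.List.index? alpha c with
    | none => none
    | some i => pvALoop rest alpha base (num + (i : Int) * base ^ power.toNat) (power - 1)

-- base = len(alphabet), str_len = len(string) inlined at their (single) use sites
def decode_base58 (string : String) (alphabet : String) : Int :=
  match pvALoop string.toList alphabet.toList (PySem.Str.len alphabet) 0 (PySem.Str.len string - 1) with
  | none => 0        -- except: character not found → return 0
  | some num => num

-- ===== PORT B =====
-- for i, c in enumerate(alphabet): if c not in index: index[c] = i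
def pvBuildIdx (cs : List Char) (i : Int) (d : PySem.Dict Char Int) : PySem.Dict Char Int :=
  match cs with
  | [] => d
  | c :: rest => pvBuildIdx rest (i + 1) (if d.contains c then d else d.insert c i)

-- for c in string: d = index.get(c); if d is None: return 0; num = num * base + d
def pvBLoop (chars : List Char) (idx : PySem.Dict Char Int) (base : Int) (num : Int) : Option Int :=
  match chars with
  | [] => some num
  | c :: rest =>
    match idx.get? c with
    | none => none
    | some dgt => pvBLoop rest idx base (num * base + dgt)

def decode_base58_alt (string : String) (alphabet : String) : Int :=
  match pvBLoop string.toList (pvBuildIdx alphabet.toList 0 PySem.Dict.empty) (PySem.Str.len alphabet) 0 with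
  | none => 0
  | some num => num

-- ===== PRECONDITION & SPEC =====
def Spec_decode_base58 (string : String) (alphabet : String) (out : Int) : Prop := out = decode_base58_alt string alphabet
instance (string : String) (alphabet : String) (out : Int) : Decidable (Spec_decode_base58 string alphabet out) := by unfold Spec_decode_base58; infer_instance

-- ===== CLAIM (what is proved, stated in full; the proofs are below) =====
def Claim_equal_decode_base58 : Prop := ∀ (string : String) (alphabet : String), Dom_decode_base58 string alphabet → Spec_decode_base58 string alphabet (decode_base58 string alphabet)

-- ===== LEMMAS AND PROOFS =====

-- the digit list of `chars` under `alpha` (none as soon as one char is missing)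
def pvDigs (alpha : List Char) : List Char → Option (List Int)
  | [] => some []
  | c :: rest =>
    match PySem.List.index? alpha c with
    | none => none
    | some n => (pvDigs alpha rest).map ((n : Int) :: ·)

-- positional value  Σ dᵢ * base^(len-1-i)
def pvPoly (base : Int) : List Int → Int
  | [] => 0
  | d :: ds => d * base ^ ds.length + pvPoly base ds

lemma pvDigs_length (alpha : List Char) :
    ∀ cs ds, pvDigs alpha cs = some ds → ds.length = cs.length := by
  intro cs
  induction cs with
  | nil => intro ds h; simp [pvDigs] at h; simp [← h]
  | cons c rest ih =>
    intro ds h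
    simp only [pvDigs] at h
    cases hi : PySem.List.index? alpha c with
    | none => rw [hi] at h; cases h
    | some n =>
      rw [hi] at h
      cases hr : pvDigs alpha rest with
      | none => rw [hr] at h; cases h
      | some ds' =>
        rw [hr] at h
        simp at h
        simp [← h, ih ds' hr]

lemma pvBuildIdx_get? (cs : List Char) (x : Char) :
    ∀ (i : Int) (d : PySem.Dict Char Int),
      (pvBuildIdx cs i d).get? x
        = ((d.get? x).or ((PySem.List.index? cs x).map (fun n : Nat => ((n : Int) + i)))) := by
  induction cs with
  | nil => intro i d; simp [pvBuildIdx, PySem.List.index?]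
  | cons c rest ih =>
    intro i d
    simp only [pvBuildIdx]
    by_cases hcx : x = c
    · subst hcx
      cases hc : d.contains x with
      | true =>
        have hs : (d.get? x).isSome := by
          rw [← PySem.Dict.contains_eq_isSome_get?]; exact hc
        obtain ⟨v, hv⟩ := Option.isSome_iff_exists.mp hs
        simp only [if_true, ih, hv]
        simp
      | false =>
        have hn : d.get? x = none := by
          have h := PySem.Dict.contains_eq_isSome_get? d x
          rw [hc] at h
          exact Option.not_isSome_iff_eq_none.mp (by simp [← h])
        simp only [Bool.false_eq_true, if_false, ih,
          PySem.Dict.get?_insert_self, hn, PySem.List.index?_cons_self]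
        simp
    · have hne : c ≠ x := fun h => hcx h.symm
      rw [PySem.List.index?_cons_of_ne rest hne]
      have hgoal : ∀ d' : PySem.Dict Char Int, d'.get? x = d.get? x →
          (pvBuildIdx rest (i + 1) d').get? x
            = ((d.get? x).or (((PySem.List.index? rest x).map (fun y => y + 1)).map
                (fun n : Nat => ((n : Int) + i)))) := by
        intro d' hd'
        rw [ih, hd']
        cases d.get? x with
        | some v => simp
        | none =>
          simp only [Option.none_or]
          cases PySem.List.index? rest x with
          | none => simp
          | some n =>
            simp only [Option.map_some, Option.some.injEq]
            push_cast
            ring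
      cases hc : d.contains c with
      | true => simp only [if_true]; exact hgoal d rfl
      | false =>
        simp only [Bool.false_eq_true, if_false]
        exact hgoal (d.insert c i) (PySem.Dict.get?_insert_of_ne d i hcx)

-- A's loop computes num + positional value of the digits
lemma pvALoop_eq (alpha : List Char) (base : Int) (chars : List Char) :
    ∀ num : Int,
      pvALoop chars alpha base num ((chars.length : Int) - 1)
        = (pvDigs alpha chars).map (fun ds => num + pvPoly base ds) := by
  induction chars with
  | nil => intro num; simp [pvALoop, pvDigs, pvPoly]
  | cons c rest ih =>
    intro num
    simp only [pvALoop, pvDigs]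
    cases PySem.List.index? alpha c with
    | none => rfl
    | some n =>
      have hpow : (((rest.length + 1 : Nat) : Int) - 1).toNat = rest.length := by omega
      have hdec : ((rest.length + 1 : Nat) : Int) - 1 - 1 = (rest.length : Int) - 1 := by omega
      simp only [List.length_cons, hpow, hdec, ih]
      cases hr : pvDigs alpha rest with
      | none => rfl
      | some ds =>
        have hl := pvDigs_length alpha rest ds hr
        simp [pvPoly, hl]
        ring

-- B's loop is Horner on the same digits
lemma pvBLoop_eq (alpha : List Char) (base : Int) (idx : PySem.Dict Char Int)
    (hidx : ∀ c, idx.get? c = (PySem.List.index? alpha c).map (fun n : Nat => (n : Int)))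
    (chars : List Char) :
    ∀ num : Int,
      pvBLoop chars idx base num
        = (pvDigs alpha chars).map (fun ds => num * base ^ ds.length + pvPoly base ds) := by
  induction chars with
  | nil => intro num; simp [pvBLoop, pvDigs, pvPoly]
  | cons c rest ih =>
    intro num
    simp only [pvBLoop, pvDigs, hidx c]
    cases PySem.List.index? alpha c with
    | none => rfl
    | some n =>
      simp only [ih]
      cases pvDigs alpha rest with
      | none => rfl
      | some ds => simp [pvPoly]; ring

-- ===== VERDICT (by name: the statement is the Claim_ definition above) =====
theorem decode_base58_spec : Claim_equal_decode_base58 := by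
  intro s a _
  unfold Spec_decode_base58 decode_base58 decode_base58_alt
  rw [PySem.Str.len_eq s]
  have hidx : ∀ c, (pvBuildIdx a.toList 0 PySem.Dict.empty).get? c
      = (PySem.List.index? a.toList c).map (fun n : Nat => (n : Int)) := by
    intro c
    rw [pvBuildIdx_get?]
    simp [PySem.Dict.get?_empty]

  rw [pvALoop_eq, pvBLoop_eq a.toList _ _ hidx]
  cases pvDigs a.toList s.toList with
  | none => rfl
  | some ds => simp
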